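-- pv_equiv track=rewrite | github.com/ezioasche/python | huln算法.py | sum_of_odd
-- ===== SOURCE A (Python) =====
-- def get_size(n):
--     return len(str(n));
--
-- def sum_of_odd(n):
--     i=0;
--     sum=0;
--     list1=[]
--     list1=str(n)
--     list2=list1[::-1]
--     if((get_size(n)%2)!=0):
--         for i in range(1,get_size(n),2):
--             sum+=int(list2[i])
--     else:
--         for i in range(0,get_size(n),2):
--             sum+=int(list2[i])
--     return sum
-- ===== SOURCE B (Python) =====
-- def sum_of_odd(n):
--     return sum(int(c) for i, c in enumerate(str(n)) if i % 2 == 1)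
-- ===== Notes on version B (the rewrite author's own statement) =====
-- stated objective: simpler
-- what changed: B drops the string reversal and the length-parity branch entirely: both of A's branches select exactly the odd 0-based positions of str(n), so B sums digits at odd positions in a single left-to-right pass over str(n).
import Mathlib
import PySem

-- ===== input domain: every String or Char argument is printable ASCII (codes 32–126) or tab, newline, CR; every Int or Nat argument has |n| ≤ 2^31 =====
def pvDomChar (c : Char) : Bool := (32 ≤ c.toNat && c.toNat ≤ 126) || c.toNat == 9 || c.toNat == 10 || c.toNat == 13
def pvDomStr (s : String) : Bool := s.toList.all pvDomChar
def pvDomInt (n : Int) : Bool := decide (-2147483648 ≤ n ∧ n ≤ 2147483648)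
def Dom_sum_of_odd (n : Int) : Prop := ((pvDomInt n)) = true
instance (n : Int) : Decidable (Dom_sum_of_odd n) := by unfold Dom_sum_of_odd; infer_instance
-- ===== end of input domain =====

-- B removes A's string reversal and length-parity branch: both branches of A select exactly
-- the odd 0-based positions of str(n), so B sums digits at odd positions in one pass (objective: simpler).


-- ===== PORT A =====
-- len(str(n))
def get_size (n : Int) : Int := PySem.Str.len (PySem.Int.toStr n)

-- literal port of A: str(n), a reversed copy via [::-1], then a parity branch summing
-- int(list2[i]) over range(1, size, 2) resp. range(0, size, 2).
-- slice? with step -1 is never none; pyGetD's default ' ' and ofChars?'s .getD 0 are never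
-- used: every index the range produces is in bounds and every selected char is a digit.
def sum_of_odd (n : Int) : Int :=
  let list1 : List Char := PySem.Int.toChars n
  let list2 : List Char := (PySem.List.slice? list1 none none (-1)).getD []
  if PySem.Int.mod (get_size n) 2 ≠ 0 then
    (PySem.List.pyRange 1 (get_size n) 2).foldl
      (fun s i => s + (PySem.Int.ofChars? [PySem.List.pyGetD list2 i ' ']).getD 0) 0
  else
    (PySem.List.pyRange 0 (get_size n) 2).foldl
      (fun s i => s + (PySem.Int.ofChars? [PySem.List.pyGetD list2 i ' ']).getD 0) 0

-- ===== PORT B =====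
-- literal port of B: sum(int(c) for i, c in enumerate(str(n)) if i % 2 == 1)
def sum_of_odd_alt (n : Int) : Int :=
  (((PySem.List.enumerate (PySem.Int.toChars n)).filter
      (fun p => PySem.Int.mod p.1 2 == 1)).map
    (fun p => (PySem.Int.ofChars? [p.2]).getD 0)).sum

-- ===== PRECONDITION & SPEC =====
def Spec_sum_of_odd (n : Int) (out : Int) : Prop := out = sum_of_odd_alt n
instance (n : Int) (out : Int) : Decidable (Spec_sum_of_odd n out) := by unfold Spec_sum_of_odd; infer_instance

-- ===== CLAIM (what is proved, stated in full; the proofs are below) =====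
def Claim_equal_sum_of_odd : Prop := ∀ (n : Int), Dom_sum_of_odd n → Spec_sum_of_odd n (sum_of_odd n)

-- ===== LEMMAS AND PROOFS =====

-- int(c) for a single character, as both ports compute it
def pvDigit (c : Char) : Int := (PySem.Int.ofChars? [c]).getD 0

-- reference function: sum of pvDigit at odd positions (flag false = current index even)
def pvAlt : Bool → List Char → Int
  | _, [] => 0
  | false, _ :: cs => pvAlt true cs
  | true, c :: cs => pvDigit c + pvAlt false cs

-- B's sum over enumerate, from any start index, equals pvAlt with the start's parity flag
theorem pvB_eq (cs : List Char) : ∀ (s : Int),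
    (((PySem.List.enumerate cs s).filter (fun p => PySem.Int.mod p.1 2 == 1)).map
      (fun p => pvDigit p.2)).sum = pvAlt (decide (s % 2 = 1)) cs := by
  have hm : (fun p : Int × Char => PySem.Int.mod p.1 2 == 1) = (fun p : Int × Char => p.1 % 2 == 1) := by
    funext p; rw [PySem.Int.mod_eq_emod_of_pos (by norm_num)]
  rw [hm]
  induction cs with
  | nil => intro s; simp [PySem.List.enumerate, pvAlt]
  | cons c cs ih =>
    intro s
    rw [PySem.List.enumerate_cons]
    rcases Int.emod_two_eq s with h | h
    · have h1 : (s + 1) % 2 = 1 := by omega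
      simp [List.filter, h, h1, ih (s + 1), pvAlt]
    · have h1 : (s + 1) % 2 = 0 := by omega
      simp [List.filter, h, h1, ih (s + 1), pvAlt]

-- the per-index summand A uses on the reversed list
def pvTerm (d : List Char) (a : Int) (k : Nat) : Int :=
  pvDigit (PySem.List.pyGetD d (a + 2 * (k : Int)) ' ')

-- A's selected reversed indices a, a+2, … read the original odd positions back to front
theorem pvT : ∀ cs : List Char,
    ((List.range (cs.length / 2)).map
      (pvTerm cs.reverse ((cs.length % 2 : Nat) : Int))).sum = pvAlt false cs
  | [] => by simp [pvAlt]
  | [c] => by simp [pvAlt]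
  | c0 :: c1 :: r => by
    have ih := pvT r
    have hmod : (c0 :: c1 :: r).length % 2 = r.length % 2 := by simp; omega
    have hdiv : (c0 :: c1 :: r).length / 2 = r.length / 2 + 1 := by simp; omega
    rw [hmod, hdiv, List.range_succ, List.map_append, List.sum_append,
      List.map_singleton, List.sum_singleton]
    have hrev : (c0 :: c1 :: r).reverse = r.reverse ++ [c1, c0] := by simp
    have hlast : pvTerm (c0 :: c1 :: r).reverse ((r.length % 2 : Nat) : Int) (r.length / 2)
        = pvDigit c1 := by
      have hidx : ((r.length % 2 : Nat) : Int) + 2 * ((r.length / 2 : Nat) : Int)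
          = (r.length : Int) := by omega
      rw [pvTerm, hrev, hidx,
        PySem.List.pyGetD_eq_getElem _ _ (by positivity) (by simp)]
      have hl : (r.length : Int).toNat = r.reverse.length := by simp
      simp [hl, List.getElem_append_right]
    have hrest : (List.range (r.length / 2)).map
          (pvTerm (c0 :: c1 :: r).reverse ((r.length % 2 : Nat) : Int))
        = (List.range (r.length / 2)).map (pvTerm r.reverse ((r.length % 2 : Nat) : Int)) := by
      apply List.map_congr_left
      intro k hk
      rw [List.mem_range] at hk
      rw [pvTerm, pvTerm, hrev,
        PySem.List.pyGetD_eq_getElem _ _ (by positivity) (by simp; omega),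
        PySem.List.pyGetD_eq_getElem _ _ (by positivity) (by simp; omega)]
      have ht : (((r.length % 2 : Nat) : Int) + 2 * (k : Int)).toNat < r.reverse.length := by
        simp; omega
      rw [List.getElem_append_left ht]
    rw [hlast, hrest, ih]
    simp [pvAlt, add_comm]

-- ===== VERDICT (by name: the statement is the Claim_ definition above) =====
theorem sum_of_odd_spec : Claim_equal_sum_of_odd := by
  intro n _
  unfold Spec_sum_of_odd sum_of_odd sum_of_odd_alt get_size
  simp only [PySem.List.slice?_none_none_neg_one, Option.getD_some, PySem.Str.len_eq,
    PySem.Int.toList_toStr]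
  set cs := PySem.Int.toChars n with hcs
  have hB := pvB_eq cs 0
  simp only [pvDigit] at hB
  rw [hB, show (decide ((0:Int) % 2 = 1)) = false from rfl]
  rw [← pvT cs]
  have hm0 : PySem.Int.mod (cs.length : Int) 2 = ((cs.length % 2 : Nat) : Int) := by
    exact_mod_cast PySem.Int.mod_natCast cs.length 2
  rcases Nat.mod_two_eq_zero_or_one cs.length with h | h
  · -- even length: else branch, start 0
    rw [if_neg (by rw [hm0, h]; simp)]
    rw [PySem.List.pyRange_of_pos _ _ (by norm_num), PySem.List.foldl_add, zero_add,
      List.map_map]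
    have hif : (if (0:Int) < (cs.length : Int)
        then (((cs.length : Int) - 0 + 2 - 1) / 2).toNat else 0) = cs.length / 2 := by
      split <;> omega
    rw [hif, h]
    apply congrArg List.sum
    apply List.map_congr_left
    intro k _
    simp [Function.comp, pvTerm, pvDigit]
  · -- odd length: then branch, start 1
    rw [if_pos (by rw [hm0, h]; simp)]
    rw [PySem.List.pyRange_of_pos _ _ (by norm_num), PySem.List.foldl_add, zero_add,
      List.map_map]
    have hif : (if (1:Int) < (cs.length : Int)
        then (((cs.length : Int) - 1 + 2 - 1) / 2).toNat else 0) = cs.length / 2 := by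
      split <;> omega
    rw [hif, h]
    apply congrArg List.sum
    apply List.map_congr_left
    intro k _
    simp [Function.comp, pvTerm, pvDigit]
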